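-- pv_equiv track=rewrite | github.com/dgabrielson/django-hackers-diet | diet/cli/detail.py | last_n_days
-- ===== SOURCE A (Python) =====
-- def last_n_days(D, R, n):
--     if len(D) <= n:
--         return D, R
--     base = D[-1] - n + 1
--     i = -1
--     while D[i] > base:
--         i -= 1
--     return D[i:], R[i:]
-- ===== SOURCE B (Python) =====
-- def last_n_days(D, R, n):
--     if len(D) <= n:
--         return D, R
--     base = D[-1] - n + 1
--     k = max(i for i, x in enumerate(D) if x <= base)
--     keep = len(D) - k
--     return D[-keep:], R[-keep:]
-- ===== Notes on version B (the rewrite author's own statement) =====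
-- stated objective: alternative
-- what changed: Replaces the backward while-loop over negative indices with a single forward pass (max over enumerate) that finds the greatest index whose value is at or below the cutoff, then slices both lists by the kept tail length.
import Mathlib
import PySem

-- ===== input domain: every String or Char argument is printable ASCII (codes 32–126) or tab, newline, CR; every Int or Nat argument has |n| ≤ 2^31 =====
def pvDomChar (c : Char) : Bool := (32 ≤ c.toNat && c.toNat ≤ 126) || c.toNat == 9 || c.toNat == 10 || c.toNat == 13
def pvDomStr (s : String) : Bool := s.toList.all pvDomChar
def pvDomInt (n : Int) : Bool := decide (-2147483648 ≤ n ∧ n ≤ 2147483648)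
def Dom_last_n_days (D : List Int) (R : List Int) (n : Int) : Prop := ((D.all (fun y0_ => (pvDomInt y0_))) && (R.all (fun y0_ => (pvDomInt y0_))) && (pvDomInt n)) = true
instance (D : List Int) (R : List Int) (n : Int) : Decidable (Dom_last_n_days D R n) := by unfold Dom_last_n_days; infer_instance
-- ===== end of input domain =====

-- B replaces A's backward while-loop over negative indices with a single forward pass
-- (max over enumerate) finding the greatest index at or below the cutoff; objective: alternative (same cost).

-- ===== PORT A =====
-- the 'while D[i] > base: i -= 1' loop; fuel = len(D) suffices on every input where the
-- Python loop terminates without an IndexError; 'none' from pyGet? is Python's IndexError (outside Pre_)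
def last_n_days_loop (D : List Int) (base : Int) : Nat → Int → Int
  | 0, i => i
  | fuel+1, i =>
    match PySem.List.pyGet? D i with
    | none => i
    | some v => if base < v then last_n_days_loop D base fuel (i-1) else i

def last_n_days (D : List Int) (R : List Int) (n : Int) : List Int × List Int :=
  if (D.length : Int) ≤ n then (D, R)
  else
    match PySem.List.pyGet? D (-1) with
    | none => (D, R)  -- D[-1] raises IndexError here (D = []); outside Pre_
    | some lastv =>
      let base := lastv - n + 1
      let i := last_n_days_loop D base D.length (-1)
      (PySem.List.slice D (some i) none, PySem.List.slice R (some i) none)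

-- ===== PORT B =====
def last_n_days_alt (D : List Int) (R : List Int) (n : Int) : List Int × List Int :=
  if (D.length : Int) ≤ n then (D, R)
  else
    match PySem.List.pyGet? D (-1) with
    | none => (D, R)  -- D[-1] raises IndexError here (D = []); outside Pre_
    | some lastv =>
      let base := lastv - n + 1
      match (PySem.List.enumerate D 0).foldl
          (fun acc p => if p.2 ≤ base then some p.1 else acc) none with
      | none => (D, R)  -- max() over an empty generator raises ValueError; outside Pre_
      | some k =>
        let keep := (D.length : Int) - k
        (PySem.List.slice D (some (-keep)) none, PySem.List.slice R (some (-keep)) none)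

-- ===== PRECONDITION & SPEC =====
-- Pre_ excludes exactly the inputs where A raises: D = [] with n < 0 (D[-1] IndexError), and
-- lists whose every element exceeds D[-1] - n + 1, where A's backward scan runs off the front (IndexError).
def Pre_last_n_days (D : List Int) (R : List Int) (n : Int) : Prop :=
  ((D.length : Int) ≤ n) ∨ ∃ x ∈ D, x ≤ D.getLastD 0 - n + 1
instance (D : List Int) (R : List Int) (n : Int) : Decidable (Pre_last_n_days D R n) := by
  unfold Pre_last_n_days; infer_instance
def pvWitness_last_n_days : List Int × List Int × Int := ([1, 2, 3], [10, 20, 30], 2)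

def Spec_last_n_days (D : List Int) (R : List Int) (n : Int) (out : List Int × List Int) : Prop := out = last_n_days_alt D R n
instance (D : List Int) (R : List Int) (n : Int) (out : List Int × List Int) : Decidable (Spec_last_n_days D R n out) := by unfold Spec_last_n_days; infer_instance

-- ===== CLAIM (what is proved, stated in full; the proofs are below) =====
def Claim_equal_last_n_days : Prop := ∀ (D : List Int) (R : List Int) (n : Int), Dom_last_n_days D R n → Pre_last_n_days D R n → Spec_last_n_days D R n (last_n_days D R n)

-- ===== LEMMAS AND PROOFS =====

-- there is a greatest index whose value is ≤ base, as soon as some value is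
lemma pv_exists_greatest (base : Int) (D : List Int) (h : ∃ x ∈ D, x ≤ base) :
    ∃ k, k < D.length ∧ D.getD k 0 ≤ base ∧
      ∀ j, k < j → j < D.length → base < D.getD j 0 := by
  induction D using List.reverseRecOn with
  | nil => simp at h
  | append_singleton xs x ih =>
    by_cases hx : x ≤ base
    · refine ⟨xs.length, by simp, ?_, ?_⟩
      · simpa [List.getD_eq_getElem?_getD] using hx
      · intro j hj1 hj2; simp at hj2; omega
    · have h' : ∃ y ∈ xs, y ≤ base := by
        rcases h with ⟨y, hy, hyle⟩
        rcases List.mem_append.mp hy with hy' | hy'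
        · exact ⟨y, hy', hyle⟩
        · simp at hy'; subst hy'; exact absurd hyle hx
      rcases ih h' with ⟨k, hk, hle, hgt⟩
      refine ⟨k, by simp; omega, ?_, ?_⟩
      · rwa [List.getD_eq_getElem?_getD, List.getElem?_append_left hk,
             ← List.getD_eq_getElem?_getD]
      · intro j hj1 hj2
        simp at hj2
        rcases Nat.lt_or_ge j xs.length with hj | hj
        · have := hgt j hj1 hj
          rwa [List.getD_eq_getElem?_getD, List.getElem?_append_left hj,
               ← List.getD_eq_getElem?_getD]
        · have hjx : j = xs.length := by omega
          subst hjx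
          have : (xs ++ [x]).getD xs.length 0 = x := by
            simp [List.getD_eq_getElem?_getD]
          rw [this]; omega

-- A's backward loop returns k - len(D) for the greatest such k
lemma pv_loopA_eq (D : List Int) (base : Int) (k : Nat) (hk : k < D.length)
    (hle : D.getD k 0 ≤ base) :
    ∀ (fuel p : Nat), k ≤ p → p < D.length →
      (∀ j, k < j → j ≤ p → base < D.getD j 0) → p - k < fuel →
      last_n_days_loop D base fuel ((p : Int) - D.length) = (k : Int) - D.length := by
  intro fuel
  induction fuel with
  | zero => intro p _ _ _ hf; omega
  | succ f ih =>
    intro p hkp hp hinv _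
    have hget : PySem.List.pyGet? D ((p : Int) - D.length) = some (D.getD p 0) := by
      have h1 : ((p : Int) - D.length) = -(((D.length - p : Nat)) : Int) := by
        push_cast [Nat.cast_sub (le_of_lt hp)]; ring
      rw [h1, PySem.List.pyGet?_neg_natCast D (D.length - p) (by omega) (by omega)]
      have h2 : D.length - (D.length - p) = p := by omega
      rw [h2, List.getElem?_eq_getElem hp, List.getD_eq_getElem?_getD,
          List.getElem?_eq_getElem hp]
      rfl
    rw [last_n_days_loop, hget]
    simp only
    by_cases hgt : base < D.getD p 0
    · rw [if_pos hgt]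
      have hpk : k < p := by
        rcases Nat.lt_or_ge k p with h | h
        · exact h
        · have : p = k := by omega
          subst this; omega
      have hstep : ((p : Int) - D.length) - 1 = ((p - 1 : Nat) : Int) - D.length := by
        push_cast [Nat.cast_sub (by omega : 1 ≤ p)]; ring
      rw [hstep]
      exact ih (p - 1) (by omega) (by omega)
        (fun j hj1 hj2 => hinv j hj1 (by omega)) (by omega)
    · rw [if_neg hgt]
      have : p = k := by
        rcases Nat.lt_or_ge k p with h | h
        · exact absurd (hinv p h (le_refl p)) hgt
        · omega
      rw [this]

-- B's forward fold returns exactly the greatest such k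
lemma pv_foldB_eq (base : Int) (D : List Int) (k : Nat) (hk : k < D.length)
    (hle : D.getD k 0 ≤ base)
    (hgt : ∀ j, k < j → j < D.length → base < D.getD j 0) :
    (PySem.List.enumerate D 0).foldl
      (fun acc p => if p.2 ≤ base then some p.1 else acc) none = some (k : Int) := by
  induction D using List.reverseRecOn generalizing k with
  | nil => simp at hk
  | append_singleton xs x ih =>
    rw [PySem.List.enumerate_append, List.foldl_append]
    simp only [PySem.List.enumerate_cons, PySem.List.enumerate_nil, List.foldl_cons,
      List.foldl_nil, zero_add]
    have hxget : (xs ++ [x]).getD xs.length 0 = x := by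
      simp [List.getD_eq_getElem?_getD]
    by_cases hx : x ≤ base
    · rw [if_pos hx]
      have hkx : k = xs.length := by
        by_contra hne
        have hklt : k < xs.length := by simp at hk; omega
        have := hgt xs.length (by omega) (by simp)
        rw [hxget] at this; omega
      rw [hkx]
    · rw [if_neg hx]
      have hkne : k ≠ xs.length := by
        intro h; rw [h, hxget] at hle; exact hx hle
      have hklt : k < xs.length := by simp at hk; omega
      have hle' : xs.getD k 0 ≤ base := by
        rwa [List.getD_eq_getElem?_getD, List.getElem?_append_left hklt,
             ← List.getD_eq_getElem?_getD] at hle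
      have hgt' : ∀ j, k < j → j < xs.length → base < xs.getD j 0 := by
        intro j hj1 hj2
        have := hgt j hj1 (by simp; omega)
        rwa [List.getD_eq_getElem?_getD, List.getElem?_append_left hj2,
             ← List.getD_eq_getElem?_getD] at this
      exact ih k hklt hle' hgt'

-- ===== VERDICT (by name: the statement is the Claim_ definition above) =====
theorem last_n_days_spec : Claim_equal_last_n_days := by
  intro D R n _ hpre
  unfold Spec_last_n_days
  by_cases hlen : (D.length : Int) ≤ n
  · simp [last_n_days, last_n_days_alt, hlen]
  · have hne : D ≠ [] := by
      intro h; subst h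
      rcases hpre with h | ⟨x, hx, _⟩
      · exact hlen h
      · simp at hx
    have hget1 : PySem.List.pyGet? D (-1) = some (D.getLast hne) := by
      rw [PySem.List.pyGet?_neg_one, List.getLast?_eq_some_getLast]
    have hlast : D.getLastD 0 = D.getLast hne := by
      rw [List.getLastD_eq_getLast?, List.getLast?_eq_some_getLast]; rfl
    have hex : ∃ x ∈ D, x ≤ D.getLast hne - n + 1 := by
      rcases hpre with h | ⟨x, hx, hxle⟩
      · exact absurd h hlen
      · exact ⟨x, hx, by rwa [hlast] at hxle⟩
    rcases pv_exists_greatest (D.getLast hne - n + 1) D hex with ⟨k, hk, hle, hgt⟩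
    have hm : 0 < D.length := List.length_pos_iff.mpr hne
    have hA : last_n_days_loop D (D.getLast hne - n + 1) D.length (-1) =
        (k : Int) - D.length := by
      have h1 : ((D.length - 1 : Nat) : Int) - D.length = -1 := by
        push_cast [Nat.cast_sub (by omega : 1 ≤ D.length)]; ring
      rw [← h1]
      exact pv_loopA_eq D _ k hk hle D.length (D.length - 1) (by omega) (by omega)
        (fun j hj1 hj2 => hgt j hj1 (by omega)) (by omega)
    have hB := pv_foldB_eq (D.getLast hne - n + 1) D k hk hle hgt
    unfold last_n_days last_n_days_alt
    rw [if_neg hlen, if_neg hlen, hget1]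
    simp only [hA, hB]
    have hkeep : -((D.length : Int) - (k : Int)) = (k : Int) - D.length := by ring
    rw [hkeep]
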